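-- pv_equiv track=rewrite | github.com/swiftpostlab/python-uv-template | scripts/transition_to_uv.py | remove_sections_with_prefix
-- ===== SOURCE A (Python) =====
-- def remove_sections_with_prefix(content: str, section_prefix: str) -> str:
--     """Remove a TOML section and any nested subsections sharing its prefix."""
--     lines = content.splitlines(keepends=True)
--     result: list[str] = []
--     skipping = False
--     header_prefix = f"[{section_prefix}"
--
--     for line in lines:
--         stripped = line.strip()
--         if stripped == f"[{section_prefix}]" or stripped.startswith(
--             f"{header_prefix}."
--         ):
--             skipping = True
--             continue
--
--         if skipping and stripped.startswith("["):
--             skipping = False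
--
--         if not skipping:
--             result.append(line)
--
--     return "".join(result)
-- ===== SOURCE B (Python) =====
-- def remove_sections_with_prefix(content: str, section_prefix: str) -> str:
--     """Split into header-delimited blocks, then filter blocks by their header line."""
--     lines = content.splitlines(keepends=True)
--     blocks = []
--     current = []
--     for line in lines:
--         if line.strip().startswith("["):
--             blocks.append(current)
--             current = [line]
--         else:
--             current.append(line)
--     blocks.append(current)
--     preamble, sections = blocks[0], blocks[1:]
--
--     def keep(block):
--         header = block[0].strip()
--         return not (
--             header == f"[{section_prefix}]"
--             or header.startswith(f"[{section_prefix}.")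
--         )
--
--     kept = [block for block in sections if keep(block)]
--     return "".join(preamble) + "".join(line for block in kept for line in block)
-- ===== Notes on version B (the rewrite author's own statement) =====
-- stated objective: alternative
-- what changed: Replaces A's single pass with a running skip flag by splitting the lines into header-delimited blocks and filtering whole blocks by their header line.
import Mathlib
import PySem

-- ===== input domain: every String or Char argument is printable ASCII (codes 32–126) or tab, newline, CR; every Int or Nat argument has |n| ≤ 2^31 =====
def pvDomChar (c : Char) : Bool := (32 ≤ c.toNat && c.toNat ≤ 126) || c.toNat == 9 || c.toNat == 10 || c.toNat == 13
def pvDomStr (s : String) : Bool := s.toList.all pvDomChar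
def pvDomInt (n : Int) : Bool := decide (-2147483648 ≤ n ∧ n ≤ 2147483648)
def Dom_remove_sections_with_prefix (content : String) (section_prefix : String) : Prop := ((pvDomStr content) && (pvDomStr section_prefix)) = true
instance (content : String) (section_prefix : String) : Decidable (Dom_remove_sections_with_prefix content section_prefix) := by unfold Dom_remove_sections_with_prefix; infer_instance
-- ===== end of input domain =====

-- B replaces A's running skip-flag single pass by a split-into-blocks-then-filter decomposition (objective: alternative, same cost).


-- shared helper: Python's str.splitlines(keepends=True); exact on Dom (line breaks there are only '\n', '\r', '\r\n')
def pvSLK (acc : List Char) : List Char → List (List Char)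
  | [] => if acc.isEmpty then [] else [acc.reverse]
  | c :: rest =>
    if c = '\n' then (acc.reverse ++ ['\n']) :: pvSLK [] rest
    else if c = '\r' then
      if rest.head? = some '\n' then (acc.reverse ++ ['\r', '\n']) :: pvSLK [] rest.tail
      else (acc.reverse ++ ['\r']) :: pvSLK [] rest
    else pvSLK (c :: acc) rest
  termination_by l => l.length

-- the drop condition: stripped == "[sp]" or stripped.startswith("[sp.")
def pvDropB (sp line : List Char) : Bool :=
  (PySem.Chars.strip line == ('[' :: sp) ++ [']'])
    || PySem.Chars.startswith (PySem.Chars.strip line) (('[' :: sp) ++ ['.'])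

-- stripped.startswith("[")
def pvHdrB (line : List Char) : Bool :=
  PySem.Chars.startswith (PySem.Chars.strip line) ['[']

-- ===== PORT A =====
-- A's loop body: running skip flag, result accumulator
def pvStepA (sp : List Char) (st : List (List Char) × Bool) (line : List Char) :
    List (List Char) × Bool :=
  if pvDropB sp line then (st.1, true)
  else
    let skipping := if st.2 && pvHdrB line then false else st.2
    if !skipping then (st.1 ++ [line], skipping) else (st.1, skipping)

def remove_sections_with_prefix (content : String) (section_prefix : String) : String :=
  let lines := pvSLK [] content.toList
  let fin := lines.foldl (pvStepA section_prefix.toList) ([], false)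
  String.mk (PySem.Chars.join [] fin.1)

-- ===== PORT B =====
-- B's block-building loop body: (finished blocks, current block)
def pvStepB (st : List (List (List Char)) × List (List Char)) (line : List Char) :
    List (List (List Char)) × List (List Char) :=
  if pvHdrB line then (st.1 ++ [st.2], [line]) else (st.1, st.2 ++ [line])

-- B's keep predicate on a block (decided by its header line)
def pvKeepB (sp : List Char) (blk : List (List Char)) : Bool :=
  match blk with
  | [] => true
  | h :: _ => !(pvDropB sp h)

def remove_sections_with_prefix_alt (content : String) (section_prefix : String) : String :=
  let lines := pvSLK [] content.toList
  let st := lines.foldl pvStepB ([], [])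
  match st.1 ++ [st.2] with
  | [] => ""
  | preamble :: sections =>
      String.mk (PySem.Chars.join []
        (preamble ++ (sections.filter (pvKeepB section_prefix.toList)).flatten))

-- ===== PRECONDITION & SPEC =====
def Spec_remove_sections_with_prefix (content : String) (section_prefix : String) (out : String) : Prop := out = remove_sections_with_prefix_alt content section_prefix
instance (content : String) (section_prefix : String) (out : String) : Decidable (Spec_remove_sections_with_prefix content section_prefix out) := by unfold Spec_remove_sections_with_prefix; infer_instance

-- ===== CLAIM (what is proved, stated in full; the proofs are below) =====
def Claim_equal_remove_sections_with_prefix : Prop := ∀ (content : String) (section_prefix : String), Dom_remove_sections_with_prefix content section_prefix → Spec_remove_sections_with_prefix content section_prefix (remove_sections_with_prefix content section_prefix)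

-- ===== LEMMAS AND PROOFS =====

-- A's output without the accumulator
def pvOutA (sp : List Char) : List (List Char) → Bool → List Char
  | [], _ => []
  | l :: rest, skip =>
    if pvDropB sp l then pvOutA sp rest true
    else
      let skip' := if skip && pvHdrB l then false else skip
      if !skip' then l ++ pvOutA sp rest skip' else pvOutA sp rest skip'

-- B's output without the block structure, tracking "current block kept"
def pvOutB (sp : List Char) : List (List Char) → Bool → List Char
  | [], _ => []
  | l :: rest, inKept =>
    if pvHdrB l then
      (if pvDropB sp l then pvOutB sp rest false else l ++ pvOutB sp rest true)
    else
      (if inKept then l ++ pvOutB sp rest true else pvOutB sp rest false)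

-- blocks produced from current block `cur` and remaining lines
def pvGB : List (List Char) → List (List Char) → List (List (List Char))
  | cur, [] => [cur]
  | cur, l :: rest => if pvHdrB l then cur :: pvGB [l] rest else pvGB (cur ++ [l]) rest

theorem pvDrop_hdr (sp l : List Char) (h : pvDropB sp l = true) : pvHdrB l = true := by
  unfold pvDropB at h
  unfold pvHdrB
  rw [PySem.Chars.startswith_iff]
  rcases Bool.or_eq_true_iff.mp h with h1 | h1
  · rw [beq_iff_eq] at h1
    rw [h1]; exact ⟨sp ++ [']'], rfl⟩
  · rw [PySem.Chars.startswith_iff] at h1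
    exact List.IsPrefix.trans ⟨sp ++ ['.'], rfl⟩ h1

theorem pvKeep_append (sp : List Char) (cur : List (List Char)) (l : List Char)
    (hl : pvHdrB l = false) : pvKeepB sp (cur ++ [l]) = pvKeepB sp cur := by
  cases cur with
  | nil =>
    simp only [List.nil_append, pvKeepB]
    cases hd : pvDropB sp l with
    | true => exact absurd (pvDrop_hdr sp l hd) (by simp [hl])
    | false => rfl
  | cons h t => rfl

theorem pvFoldA (sp : List Char) (lines : List (List Char)) :
    ∀ acc skip, ((lines.foldl (pvStepA sp) (acc, skip)).1).flatten
      = acc.flatten ++ pvOutA sp lines skip := by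
  induction lines with
  | nil => intro acc skip; simp [pvOutA]
  | cons l rest ih =>
    intro acc skip
    simp only [List.foldl_cons, pvStepA, pvOutA]
    by_cases hd : pvDropB sp l = true
    · simp [hd, ih]
    · simp only [Bool.not_eq_true] at hd
      simp only [hd, if_false, Bool.false_eq_true]
      cases hs : (if skip && pvHdrB l then false else skip) with
      | false => simp [ih, List.append_assoc]
      | true => simp [ih]

theorem pvFoldB (lines : List (List Char)) :
    ∀ done cur, (lines.foldl pvStepB (done, cur)).1 ++ [(lines.foldl pvStepB (done, cur)).2]
      = done ++ pvGB cur lines := by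
  induction lines with
  | nil => intro done cur; simp [pvGB]
  | cons l rest ih =>
    intro done cur
    simp only [List.foldl_cons, pvStepB, pvGB]
    by_cases hh : pvHdrB l = true
    · simp [hh, ih]
    · simp only [Bool.not_eq_true] at hh
      simp [hh, ih]

theorem pvRenderB (sp : List Char) (lines : List (List Char)) :
    ∀ cur, (((pvGB cur lines).filter (pvKeepB sp)).flatten).flatten
      = (if pvKeepB sp cur then cur.flatten ++ pvOutB sp lines true else pvOutB sp lines false) := by
  induction lines with
  | nil =>
    intro cur
    simp only [pvGB, pvOutB]
    cases h : pvKeepB sp cur <;> simp [List.filter, h]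
  | cons l rest ih =>
    intro cur
    simp only [pvGB, pvOutB]
    by_cases hh : pvHdrB l = true
    · simp only [hh, if_true]
      have hkl : pvKeepB sp [l] = !(pvDropB sp l) := rfl
      cases h : pvKeepB sp cur with
      | true =>
        simp only [List.filter_cons, h, if_true, List.flatten_cons, List.flatten_append, ih [l], hkl]
        cases hd : pvDropB sp l <;> simp
      | false =>
        simp only [List.filter_cons, h, Bool.false_eq_true, if_false, ih [l], hkl]
        cases hd : pvDropB sp l <;> simp
    · simp only [Bool.not_eq_true] at hh
      simp only [hh, Bool.false_eq_true, if_false]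
      rw [ih (cur ++ [l]), pvKeep_append sp cur l hh]
      cases h : pvKeepB sp cur <;> simp

theorem pvHeadB (sp : List Char) (lines : List (List Char)) :
    ∀ cur, pvKeepB sp cur = true →
      (match pvGB cur lines with
       | [] => []
       | p :: ss => p.flatten ++ ((ss.filter (pvKeepB sp)).flatten).flatten)
      = cur.flatten ++ pvOutB sp lines true := by
  induction lines with
  | nil => intro cur _; simp [pvGB, pvOutB]
  | cons l rest ih =>
    intro cur hk
    simp only [pvGB, pvOutB]
    by_cases hh : pvHdrB l = true
    · simp only [hh, if_true]
      rw [pvRenderB sp rest [l]]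
      have hkl : pvKeepB sp [l] = !(pvDropB sp l) := rfl
      rw [hkl]
      cases hd : pvDropB sp l <;> simp
    · simp only [Bool.not_eq_true] at hh
      simp only [hh, Bool.false_eq_true, if_false]
      rw [ih (cur ++ [l]) (by rw [pvKeep_append sp cur l hh]; exact hk)]
      simp

theorem pvAB (sp : List Char) (lines : List (List Char)) :
    ∀ skip, pvOutA sp lines skip = pvOutB sp lines (!skip) := by
  induction lines with
  | nil => intro skip; rfl
  | cons l rest ih =>
    intro skip
    simp only [pvOutA, pvOutB]
    by_cases hd : pvDropB sp l = true
    · simp [hd, pvDrop_hdr sp l hd, ih]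
    · simp only [Bool.not_eq_true] at hd
      simp only [hd, Bool.false_eq_true, if_false]
      by_cases hh : pvHdrB l = true
      · cases skip <;> simp [hh, ih]
      · simp only [Bool.not_eq_true] at hh
        cases skip <;> simp [hh, ih]

theorem pvJoinNil (l : List (List Char)) : PySem.Chars.join [] l = l.flatten := by
  induction l with
  | nil => rfl
  | cons h t ih =>
    cases t with
    | nil => simp [PySem.Chars.join, List.intercalate, List.intersperse]
    | cons h2 t2 =>
      simp only [PySem.Chars.join, List.intercalate] at *
      simp [List.intersperse, List.flatten] at *
      simp [ih]

-- ===== VERDICT (by name: the statement is the Claim_ definition above) =====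
theorem remove_sections_with_prefix_spec : Claim_equal_remove_sections_with_prefix := by
  intro content section_prefix _
  unfold Spec_remove_sections_with_prefix
  unfold remove_sections_with_prefix remove_sections_with_prefix_alt
  simp only []
  rw [pvJoinNil, pvFoldA]
  have hB := pvFoldB (pvSLK [] content.toList) [] []
  simp only [List.nil_append] at hB
  rw [hB]
  have hH := pvHeadB section_prefix.toList (pvSLK [] content.toList) [] rfl
  cases hg : pvGB [] (pvSLK [] content.toList) with
  | nil =>
    rw [hg] at hH
    simp only at hH
    rw [pvAB]
    simp only [Bool.not_false, ← hH]
    rfl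
  | cons p ss =>
    rw [hg] at hH
    simp only at hH
    simp only at hH ⊢
    rw [pvAB]
    simp only [Bool.not_false]
    rw [← hH, pvJoinNil, List.flatten_append]
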